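-- pv_equiv track=rewrite | github.com/raghonya/drone_detector_classifier | Hardware/Server/server.py | detect_drone
-- ===== SOURCE A (Python) =====
-- def detect_drone(amplitudes: list) -> bool:
--     count = 0
--     for amp in amplitudes:
--         if amp >= -70:
--             count += 1
--             if count >= 3:
--                 return True  # Drone detected
--         else:
--             count = 0  # Reset the count if the condition is broken
--     return False  # No drone detected
-- ===== SOURCE B (Python) =====
-- def detect_drone(amplitudes: list) -> bool:
--     for i in range(len(amplitudes) - 2):
--         if all(a >= -70 for a in amplitudes[i:i+3]):
--             return True
--     return False
-- ===== Notes on version B (the rewrite author's own statement) =====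
-- stated objective: alternative
-- what changed: Replaces the stateful reset counter with a sliding-window scan: for each index i it tests whether the window amplitudes[i:i+3] lies entirely at or above -70, with no maintained count.
import Mathlib
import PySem

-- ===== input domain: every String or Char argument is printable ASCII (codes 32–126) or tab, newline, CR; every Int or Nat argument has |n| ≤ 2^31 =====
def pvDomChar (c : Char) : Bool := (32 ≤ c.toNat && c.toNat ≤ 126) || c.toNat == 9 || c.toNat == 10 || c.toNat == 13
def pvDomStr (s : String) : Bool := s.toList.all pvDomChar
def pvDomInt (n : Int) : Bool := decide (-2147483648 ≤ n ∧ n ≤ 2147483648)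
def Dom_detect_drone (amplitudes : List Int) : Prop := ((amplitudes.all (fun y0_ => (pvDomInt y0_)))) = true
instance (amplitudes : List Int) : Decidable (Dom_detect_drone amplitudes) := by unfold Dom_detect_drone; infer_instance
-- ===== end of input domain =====

-- B uses a sliding-window scan instead of A's stateful reset counter (alternative decomposition).

-- ===== PORT A =====
-- the 'for amp in amplitudes' loop with its running count and early return
def pvGoA (count : Int) : List Int → Bool
  | [] => false
  | amp :: rest =>
      if amp ≥ -70 then
        (if count + 1 ≥ 3 then true else pvGoA (count + 1) rest)
      else
        pvGoA 0 rest

def detect_drone (amplitudes : List Int) : Bool := pvGoA 0 amplitudes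

-- ===== PORT B =====
-- 'for i in range(len(amplitudes)-2): if all(a >= -70 for a in amplitudes[i:i+3]): return True'
def detect_drone_alt (amplitudes : List Int) : Bool :=
  (List.range (amplitudes.length - 2)).any
    (fun i => (PySem.List.slice amplitudes (some (i : Int)) (some ((i : Int) + 3))).all
      (fun a => a ≥ -70))

-- ===== PRECONDITION & SPEC =====
def Spec_detect_drone (amplitudes : List Int) (out : Bool) : Prop := out = detect_drone_alt amplitudes
instance (amplitudes : List Int) (out : Bool) : Decidable (Spec_detect_drone amplitudes out) := by unfold Spec_detect_drone; infer_instance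

-- ===== CLAIM (what is proved, stated in full; the proofs are below) =====
def Claim_equal_detect_drone : Prop := ∀ (amplitudes : List Int), Dom_detect_drone amplitudes → Spec_detect_drone amplitudes (detect_drone amplitudes)

-- ===== LEMMAS AND PROOFS =====

-- reference predicate: some window of three consecutive amplitudes is entirely ≥ -70
def pvW : List Int → Bool
  | a :: b :: c :: rest =>
      (decide (a ≥ -70) && (decide (b ≥ -70) && decide (c ≥ -70))) || pvW (b :: c :: rest)
  | _ => false

-- first element ok / first two elements ok (leading partial window)
def pvH1 : List Int → Bool
  | a :: _ => decide (a ≥ -70)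
  | _ => false

def pvH2 : List Int → Bool
  | a :: b :: _ => decide (a ≥ -70) && decide (b ≥ -70)
  | _ => false

lemma pvGoA_spec (xs : List Int) :
    pvGoA 0 xs = pvW xs ∧ pvGoA 1 xs = (pvH2 xs || pvW xs) ∧ pvGoA 2 xs = (pvH1 xs || pvW xs) := by
  induction xs with
  | nil => simp [pvGoA, pvW, pvH1, pvH2]
  | cons a rest ih =>
    obtain ⟨ih0, ih1, ih2⟩ := ih
    have e0 : pvGoA 0 (a :: rest) = if a ≥ -70 then pvGoA 1 rest else pvGoA 0 rest := by
      simp [pvGoA]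
    have e1 : pvGoA 1 (a :: rest) = if a ≥ -70 then pvGoA 2 rest else pvGoA 0 rest := by
      simp [pvGoA]
    have e2 : pvGoA 2 (a :: rest) = if a ≥ -70 then true else pvGoA 0 rest := by
      simp [pvGoA]
    rw [e0, e1, e2, ih0, ih1, ih2]
    rcases rest with _ | ⟨b, rest1⟩
    · by_cases ha : a ≥ -70 <;> simp [pvW, pvH1, pvH2, ha]
    · rcases rest1 with _ | ⟨c, rest2⟩
      · by_cases ha : a ≥ -70 <;> by_cases hb : b ≥ -70 <;>
          simp [pvW, pvH1, pvH2, ha, hb]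
      · by_cases ha : a ≥ -70 <;> by_cases hb : b ≥ -70 <;> by_cases hc : c ≥ -70 <;>
          simp [pvW, pvH1, pvH2, ha, hb, hc]

-- B's window test, with the slice expressed as drop/take
lemma pvAlt_drop (xs : List Int) :
    detect_drone_alt xs
      = (List.range (xs.length - 2)).any (fun i => ((xs.drop i).take 3).all (fun a => a ≥ -70)) := by
  unfold detect_drone_alt
  refine List.any_congr rfl (fun i => ?_)
  rw [show ((i : Nat) : Int) + 3 = ((i : Nat) : Int) + ((3 : Nat) : Int) by norm_num,
      PySem.List.slice_natCast_add]

lemma pvAlt_eq_W (xs : List Int) : detect_drone_alt xs = pvW xs := by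
  induction xs with
  | nil => simp [detect_drone_alt, pvW]
  | cons a rest ih =>
    rcases rest with _ | ⟨b, rest1⟩
    · simp [detect_drone_alt, pvW]
    · rcases rest1 with _ | ⟨c, rest2⟩
      · simp [detect_drone_alt, pvW]
      · have hl : (a :: b :: c :: rest2).length - 2 = ((b :: c :: rest2).length - 2) + 1 := by
          simp
        rw [pvAlt_drop, hl, List.range_succ_eq_map, List.any_cons, List.any_map]
        have h1 : ((List.range ((b :: c :: rest2).length - 2)).any
            ((fun i => (((a :: b :: c :: rest2).drop i).take 3).all (fun x => x ≥ -70)) ∘ Nat.succ))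
            = detect_drone_alt (b :: c :: rest2) := by
          rw [pvAlt_drop]
          refine List.any_congr rfl (fun i => ?_)
          simp [List.drop_succ_cons]
        rw [h1, ih]
        conv_rhs => rw [pvW]
        simp
-- ===== VERDICT (by name: the statement is the Claim_ definition above) =====
theorem detect_drone_spec : Claim_equal_detect_drone := by
  intro xs _
  unfold Spec_detect_drone detect_drone
  rw [pvAlt_eq_W, ← (pvGoA_spec xs).1]
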